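-- pv_equiv track=rewrite | github.com/GuoBioinfoLab/CATT | bioTSApypy.py | BackgroundExtract
-- ===== SOURCE A (Python) =====
-- def BackgroundExtract(seq):
--     res = []
--     Lgt = len(seq)
--     C = [idx for idx in range(Lgt) if seq[idx] == 'C']
--     F = [idx for idx in range(Lgt) if seq[idx] == 'F']
--
--     if len(C) < 1 or len(F) < 1:
--         return res
--     for xc in C:
--         for f in F:
--             if f - xc >= 8:
--                 res.append(seq[xc:f + 1])
--     return res
-- ===== SOURCE B (Python) =====
-- def BackgroundExtract(seq):
--     res = []
--     C = [i for i, ch in enumerate(seq) if ch == 'C']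
--     F = [i for i, ch in enumerate(seq) if ch == 'F']
--     if not C or not F:
--         return res
--     n = len(F)
--     for xc in C:
--         # F is ascending: binary-search the first f with f >= xc + 8,
--         # then take the whole suffix with no per-element test.
--         key = xc + 8
--         lo, hi = 0, n
--         while lo < hi:
--             mid = (lo + hi) // 2
--             if F[mid] < key:
--                 lo = mid + 1
--             else:
--                 hi = mid
--         for f in F[lo:]:
--             res.append(seq[xc:f + 1])
--     return res
-- ===== Notes on version B (the rewrite author's own statement) =====
-- stated objective: alternative
-- what changed: B exploits that the F-index list is ascending: for each C index it binary-searches the first F index >= xc+8 and emits the whole remaining suffix of F, replacing A's inner linear scan with a per-element comparison; C/F are built with enumerate instead of range+indexing.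
import Mathlib
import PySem

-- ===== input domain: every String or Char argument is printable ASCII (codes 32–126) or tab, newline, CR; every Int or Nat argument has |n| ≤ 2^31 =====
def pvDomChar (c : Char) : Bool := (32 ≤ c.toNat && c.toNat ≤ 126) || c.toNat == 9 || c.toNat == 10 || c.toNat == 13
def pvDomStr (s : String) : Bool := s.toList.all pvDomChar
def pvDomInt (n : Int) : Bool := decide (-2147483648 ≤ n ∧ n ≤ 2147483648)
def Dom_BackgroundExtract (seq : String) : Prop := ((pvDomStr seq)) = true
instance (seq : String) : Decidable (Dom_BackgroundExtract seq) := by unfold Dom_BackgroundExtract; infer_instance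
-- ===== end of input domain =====

-- B replaces A's inner linear scan over F (test every f) by a binary search for the first
-- F index ≥ xc+8 followed by the whole remaining suffix of F (objective: alternative traversal).

-- ===== PORT A =====
def BackgroundExtract (seq : String) : List String :=
  let res : List String := []
  let Lgt : Int := PySem.Str.len seq
  let C : List Int := (PySem.List.pyRange 0 Lgt 1).filter
      (fun idx => PySem.Str.pyGet? seq idx == some 'C')
  let F : List Int := (PySem.List.pyRange 0 Lgt 1).filter
      (fun idx => PySem.Str.pyGet? seq idx == some 'F')
  if C.length < 1 ∨ F.length < 1 then res
  else
    C.foldl (fun res xc =>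
      F.foldl (fun res f =>
        if f - xc ≥ 8 then res ++ [PySem.Str.slice seq (some xc) (some (f + 1))]
        else res) res) res

-- ===== PORT B =====
-- the hand-written bisect_left while-loop of Source B, step for step
def bExtBisect (F : List Int) (key : Int) (lo hi : Nat) : Nat :=
  if _h : lo < hi then
    let mid := (lo + hi) / 2
    if F.getD mid 0 < key then bExtBisect F key (mid + 1) hi
    else bExtBisect F key lo mid
  else lo
termination_by hi - lo
decreasing_by all_goals omega

def BackgroundExtract_alt (seq : String) : List String :=
  let res : List String := []
  let C : List Int := ((PySem.List.enumerate seq.toList 0).filter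
      (fun p => p.2 == 'C')).map (·.1)
  let F : List Int := ((PySem.List.enumerate seq.toList 0).filter
      (fun p => p.2 == 'F')).map (·.1)
  if C.isEmpty ∨ F.isEmpty then res
  else
    let n := F.length
    C.foldl (fun res xc =>
      let lo := bExtBisect F (xc + 8) 0 n
      (PySem.List.slice F (some (lo : Int)) none).foldl
        (fun res f => res ++ [PySem.Str.slice seq (some xc) (some (f + 1))]) res) res

-- ===== PRECONDITION & SPEC =====
def Spec_BackgroundExtract (seq : String) (out : List String) : Prop := out = BackgroundExtract_alt seq
instance (seq : String) (out : List String) : Decidable (Spec_BackgroundExtract seq out) := by unfold Spec_BackgroundExtract; infer_instance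

-- ===== CLAIM (what is proved, stated in full; the proofs are below) =====
def Claim_equal_BackgroundExtract : Prop := ∀ (seq : String), Dom_BackgroundExtract seq → Spec_BackgroundExtract seq (BackgroundExtract seq)

-- ===== LEMMAS AND PROOFS =====

-- A's inner loop ('if p(f): res.append(g(f))') is acc ++ map over the filtered list
theorem bExtInnerA_eq {α β : Type} (l : List α) (p : α → Prop) [DecidablePred p]
    (g : α → β) (acc : List β) :
    l.foldl (fun r x => if p x then r ++ [g x] else r) acc
      = acc ++ (l.filter (fun x => decide (p x))).map g := by
  induction l generalizing acc with
  | nil => simp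
  | cons a l ih => by_cases h : p a <;> simp [h, ih]

-- if p is false on the first r positions and true after, filtering is dropping r
theorem bExtFilter_eq_drop {α : Type} (d : α) (F : List α) (p : α → Bool) (r : Nat)
    (hr : r ≤ F.length)
    (h1 : ∀ j, j < r → p (F.getD j d) = false)
    (h2 : ∀ j, r ≤ j → j < F.length → p (F.getD j d) = true) :
    F.filter p = F.drop r := by
  induction F generalizing r with
  | nil => simp
  | cons a F ih =>
    cases r with
    | zero =>
      rw [List.drop_zero, List.filter_eq_self.mpr]
      intro x hx
      obtain ⟨k, hk, rfl⟩ := List.mem_iff_getElem.mp hx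
      have := h2 k (Nat.zero_le k) (by simpa using hk)
      rwa [List.getD_eq_getElem _ _ (by simpa using hk)] at this
    | succ r =>
      have ha := h1 0 (Nat.succ_pos r)
      simp only [List.getD_cons_zero] at ha
      rw [List.filter_cons, ha]
      simp only [List.drop_succ_cons]
      exact ih r (by simpa using hr)
        (fun j hj => by simpa using h1 (j+1) (by omega))
        (fun j hj1 hj2 => by simpa using h2 (j+1) (by omega) (by simpa using Nat.succ_lt_succ hj2))

-- B's enumerate-based index comprehension equals A's range-based one
theorem bExtIdx_eq (seq : String) (c : Char) :
    ((PySem.List.enumerate seq.toList 0).filter (fun p => p.2 == c)).map (·.1)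
      = (PySem.List.pyRange 0 (PySem.Str.len seq) 1).filter
          (fun idx => PySem.Str.pyGet? seq idx == some c) := by
  rw [show PySem.List.enumerate seq.toList 0 = PySem.List.enumerate seq.toList from rfl]
  rw [PySem.List.enumerate_eq_map_pyRange seq.toList ' ']
  rw [List.filter_map, List.map_map]
  have hlen : PySem.List.len seq.toList = PySem.Str.len seq := by
    simp [PySem.Str.len_eq, PySem.List.len]
  rw [hlen]
  have : ∀ x ∈ PySem.List.pyRange 0 (PySem.Str.len seq) 1,
      ((fun (p : Int × Char) => p.2 == c) ∘ (fun j => (j, PySem.List.pyGetD seq.toList j ' '))) x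
        = (fun idx => PySem.Str.pyGet? seq idx == some c) x := by
    intro x hx
    obtain ⟨h0, h1⟩ := PySem.List.mem_pyRange_one.mp hx
    rw [PySem.Str.len_eq] at h1
    simp only [Function.comp_apply]
    rw [PySem.List.pyGetD_eq_getElem _ _ h0 h1, PySem.Str.pyGet?_eq,
      PySem.Chars.pyGet?_eq_listPyGet?, PySem.List.pyGet?_eq_some_getElem _ h0 h1]
    simp
  rw [List.filter_congr this]
  have : ((fun (p : Int × Char) => p.1) ∘ (fun j => (j, PySem.List.pyGetD seq.toList j ' ')))
      = id := by funext j; rfl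
  rw [List.map_congr_left (fun x _ => congrFun this x), List.map_id]

-- the while-loop finds the boundary: everything before it is < key, everything after is ≥ key
theorem bExtBisect_spec (F : List Int) (key : Int)
    (hsort : ∀ i j, i ≤ j → j < F.length → F.getD i 0 ≤ F.getD j 0) :
    ∀ (lo hi : Nat), lo ≤ hi → hi ≤ F.length →
    lo ≤ bExtBisect F key lo hi ∧ bExtBisect F key lo hi ≤ hi ∧
    (∀ j, lo ≤ j → j < bExtBisect F key lo hi → F.getD j 0 < key) ∧
    (∀ j, bExtBisect F key lo hi ≤ j → j < hi → key ≤ F.getD j 0) := by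
  intro lo hi
  induction lo, hi using bExtBisect.induct F key with
  | case1 lo hi h mid hlt ih =>
    intro hlohi hhi
    rw [bExtBisect]
    simp only [dif_pos h]
    have hm : mid = (lo + hi) / 2 := rfl
    simp only [← hm]
    rw [if_pos hlt]
    obtain ⟨h1, h2, h3, h4⟩ := ih (by omega) hhi
    refine ⟨by omega, h2, ?_, h4⟩
    intro j hj1 hj2
    by_cases hc : mid + 1 ≤ j
    · exact h3 j hc hj2
    · calc F.getD j 0 ≤ F.getD mid 0 := hsort j mid (by omega) (by omega)
        _ < key := hlt
  | case2 lo hi h mid hlt ih =>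
    intro hlohi hhi
    rw [bExtBisect]
    simp only [dif_pos h]
    have hm : mid = (lo + hi) / 2 := rfl
    simp only [← hm]
    rw [if_neg hlt]
    obtain ⟨h1, h2, h3, h4⟩ := ih (by omega) (by omega)
    refine ⟨h1, by omega, h3, ?_⟩
    intro j hj1 hj2
    by_cases hc : j < mid
    · exact h4 j hj1 hc
    · calc key ≤ F.getD mid 0 := le_of_not_gt hlt
        _ ≤ F.getD j 0 := hsort mid j (by omega) (by omega)
  | case3 lo hi h =>
    intro hlohi hhi
    rw [bExtBisect]
    simp only [dif_neg h]
    exact ⟨le_refl _, by omega, by omega, by omega⟩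

theorem bExtMono (F : List Int) (h : F.Pairwise (· < ·)) :
    ∀ i j, i ≤ j → j < F.length → F.getD i 0 ≤ F.getD j 0 := by
  intro i j hij hj
  rcases eq_or_lt_of_le hij with rfl | hlt
  · exact le_refl _
  · rw [List.getD_eq_getElem _ _ (by omega), List.getD_eq_getElem _ _ hj]
    exact le_of_lt (List.pairwise_iff_getElem.mp h i j (by omega) hj hlt)

theorem backgroundExtract_eq (seq : String) :
    BackgroundExtract seq = BackgroundExtract_alt seq := by
  unfold BackgroundExtract BackgroundExtract_alt
  rw [bExtIdx_eq seq 'C', bExtIdx_eq seq 'F']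
  set C := (PySem.List.pyRange 0 (PySem.Str.len seq) 1).filter
      (fun idx => PySem.Str.pyGet? seq idx == some 'C') with hC
  set F := (PySem.List.pyRange 0 (PySem.Str.len seq) 1).filter
      (fun idx => PySem.Str.pyGet? seq idx == some 'F') with hF
  by_cases hCe : C = []
  · rw [if_pos (Or.inl (by rw [← hC, hCe]; simp)), if_pos (Or.inl (by simp [hCe]))]
  by_cases hFe : F = []
  · rw [if_pos (Or.inr (by rw [← hF, hFe]; simp)), if_pos (Or.inr (by simp [hFe]))]
  have hCl : ¬ (C.length < 1 ∨ F.length < 1) := by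
    have h1 : C.length ≠ 0 := fun h => hCe (List.eq_nil_of_length_eq_zero h)
    have h2 : F.length ≠ 0 := fun h => hFe (List.eq_nil_of_length_eq_zero h)
    omega
  rw [if_neg hCl, if_neg (by simp [hCe, hFe])]
  have hsortF : ∀ i j, i ≤ j → j < F.length → F.getD i 0 ≤ F.getD j 0 :=
    bExtMono F ((PySem.List.pairwise_lt_pyRange_one 0 (PySem.Str.len seq)).filter _)
  have hfun : (fun (res : List String) (xc : Int) =>
        F.foldl (fun res f =>
          if f - xc ≥ 8 then res ++ [PySem.Str.slice seq (some xc) (some (f + 1))]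
          else res) res)
      = (fun (res : List String) (xc : Int) =>
          (PySem.List.slice F (some ((bExtBisect F (xc + 8) 0 F.length : Nat) : Int)) none).foldl
            (fun res f => res ++ [PySem.Str.slice seq (some xc) (some (f + 1))]) res) := by
    funext res xc
    rw [PySem.List.slice_from_natCast, PySem.List.foldl_append_singleton_eq_map,
      bExtInnerA_eq F (fun f => f - xc ≥ 8)]
    congr 1
    congr 1
    obtain ⟨_, hle, hlt', hge⟩ :=
      bExtBisect_spec F (xc + 8) hsortF 0 F.length (Nat.zero_le _) (le_refl _)
    refine bExtFilter_eq_drop 0 F _ (bExtBisect F (xc + 8) 0 F.length) hle ?_ ?_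
    · intro j hj
      have := hlt' j (Nat.zero_le j) hj
      simp only [decide_eq_false_iff_not]
      omega
    · intro j hj1 hj2
      have := hge j hj1 hj2
      simp only [decide_eq_true_eq]
      omega
  rw [hfun]

-- ===== VERDICT (by name: the statement is the Claim_ definition above) =====
theorem BackgroundExtract_spec : Claim_equal_BackgroundExtract := by
  intro seq _
  exact backgroundExtract_eq seq
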